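-- pv_equiv track=rewrite | github.com/SrishtiPatil/HackerRank_Codes | Python_Codes/Mutations.py | mutate_string
-- ===== SOURCE A (Python) =====
-- def mutate_string(string, position, character):
--     result=''
--     j=0
--     for i in string:
--         if j==position:
--             result+=character
--         else:
--             result+=i
--         j+=1
--     return result
-- ===== SOURCE B (Python) =====
-- def mutate_string(string, position, character):
--     if 0 <= position < len(string):
--         return string[:position] + character + string[position + 1:]
--     return string
-- ===== Notes on version B (the rewrite author's own statement) =====
-- stated objective: simpler
-- what changed: Replaces the char-by-char accumulation loop with a single guarded slice splice: string[:position] + character + string[position+1:], returning the string unchanged when position is out of range.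
import Mathlib
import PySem

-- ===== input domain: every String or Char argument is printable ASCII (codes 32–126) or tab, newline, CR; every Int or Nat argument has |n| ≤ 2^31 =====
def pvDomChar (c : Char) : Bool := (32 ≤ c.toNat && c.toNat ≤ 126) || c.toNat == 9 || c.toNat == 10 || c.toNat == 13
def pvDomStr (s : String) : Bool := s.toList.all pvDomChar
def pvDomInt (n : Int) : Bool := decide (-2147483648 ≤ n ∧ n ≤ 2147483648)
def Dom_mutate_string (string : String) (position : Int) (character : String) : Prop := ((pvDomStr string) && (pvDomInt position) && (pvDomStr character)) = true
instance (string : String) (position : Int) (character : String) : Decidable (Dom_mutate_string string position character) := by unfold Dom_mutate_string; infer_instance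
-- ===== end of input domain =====

-- B replaces A's char-by-char accumulation loop with a guarded slice splice (objective: simpler).

-- ===== PORT A =====
-- A's for-loop over the string with counter j, appending character at j == position, else the char.
def mutateLoopA (chars : List Char) (j position : Int) (character : List Char) : List Char :=
  match chars with
  | [] => []
  | c :: cs => (if j = position then character else [c]) ++ mutateLoopA cs (j + 1) position character

def mutate_string (string : String) (position : Int) (character : String) : String :=
  String.ofList (mutateLoopA string.toList 0 position character.toList)

-- ===== PORT B =====
-- Source B: if 0 <= position < len(string): return string[:position] + character + string[position+1:]; return string
def mutate_string_alt (string : String) (position : Int) (character : String) : String :=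
  if 0 ≤ position ∧ position < (string.toList.length : Int) then
    String.ofList (PySem.List.slice string.toList none (some position) ++ character.toList
      ++ PySem.List.slice string.toList (some (position + 1)) none)
  else string

-- ===== PRECONDITION & SPEC =====
def Spec_mutate_string (string : String) (position : Int) (character : String) (out : String) : Prop := out = mutate_string_alt string position character
instance (string : String) (position : Int) (character : String) (out : String) : Decidable (Spec_mutate_string string position character out) := by unfold Spec_mutate_string; infer_instance

-- ===== CLAIM (what is proved, stated in full; the proofs are below) =====
def Claim_equal_mutate_string : Prop := ∀ (string : String) (position : Int) (character : String), Dom_mutate_string string position character → Spec_mutate_string string position character (mutate_string string position character)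

-- ===== LEMMAS AND PROOFS =====

theorem mutateLoopA_spec (chars : List Char) (j position : Int) (character : List Char) :
    mutateLoopA chars j position character =
      if j ≤ position ∧ position < j + chars.length then
        chars.take (position - j).toNat ++ character ++ chars.drop (position - j + 1).toNat
      else chars := by
  induction chars generalizing j with
  | nil => simp [mutateLoopA]
  | cons c cs ih =>
    simp only [mutateLoopA, ih (j + 1), List.length_cons]
    by_cases hj : j = position
    · subst hj
      rw [if_pos rfl]
      split_ifs with hA hB hB2
      · exfalso; omega
      · exfalso; omega
      · simp
      · exfalso; push_cast at hB2; omega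
    · rw [if_neg hj]
      split_ifs with hA hB hB2
      · have ht : (position - j).toNat = (position - (j+1)).toNat + 1 := by omega
        have hd : (position - j + 1).toNat = (position - (j+1) + 1).toNat + 1 := by omega
        simp [ht, hd]
      · exfalso; push_cast at hA hB; omega
      · exfalso; push_cast at hA hB2; omega
      · simp

theorem mutate_string_spec : Claim_equal_mutate_string := by
  intro string position character _
  unfold Spec_mutate_string mutate_string mutate_string_alt
  rw [mutateLoopA_spec]
  by_cases h : 0 ≤ position ∧ position < (string.toList.length : Int)
  · have h' : (0 : Int) ≤ position ∧ position < 0 + (string.toList.length : Int) := by omega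
    rw [if_pos h', if_pos h]
    rw [PySem.List.slice_to _ h.1, PySem.List.slice_from _ (by omega : (0:Int) ≤ position + 1)]
    simp
  · have h' : ¬ ((0 : Int) ≤ position ∧ position < 0 + (string.toList.length : Int)) := by omega
    rw [if_neg h', if_neg h]
    simp [String.ofList]
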